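-- pv_equiv track=rewrite | github.com/abhishekbhadoriya421/DataStructureAlgo | Aggressive Cows.py | aggressiveCowsBruteForce
-- ===== SOURCE A (Python) =====
-- def canBeAPossibleSolution(stalls,arrayLength,cows,distance):
--     # Brute force approach to check if it is possible to place the cows at the given distance
--     count = 1 # we have already placed one cow at starting
--     indexOfPreviousCow =  0 # My first cow is always placed at first position
--     for currentIndex in range(1,arrayLength):
--         distanceBetweenTowCows = stalls[currentIndex] - stalls[indexOfPreviousCow]
--         if distanceBetweenTowCows >= distance:
--             count+=1
--             indexOfPreviousCow = currentIndex
--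
--         if(count == cows):
--             return True
--     return False
--
-- def aggressiveCowsBruteForce(stalls,cows):
--     maximumDistance = stalls[-1] - stalls[0]
--     ans = 1
--     for dis in range(1,maximumDistance+1):
--         possibleSolution = canBeAPossibleSolution(stalls,len(stalls),cows,dis)
--         if possibleSolution:
--             ans = max(ans,dis)
--     return ans
-- ===== SOURCE B (Python) =====
-- def canPlace(stalls, cows, distance):
--     count = 1
--     prev = stalls[0]
--     for x in stalls[1:]:
--         if x - prev >= distance:
--             count += 1
--             prev = x
--     return count >= cows
--
-- def aggressiveCowsBruteForce(stalls, cows):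
--     lo, hi = 1, stalls[-1] - stalls[0]
--     ans = 1
--     while lo <= hi:
--         mid = (lo + hi) // 2
--         if canPlace(stalls, cows, mid):
--             ans = mid
--             lo = mid + 1
--         else:
--             hi = mid - 1
--     return ans
-- ===== Notes on version B (the rewrite author's own statement) =====
-- stated objective: faster
-- what changed: B replaces A's linear scan over every candidate distance 1..(stalls[-1]-stalls[0]) with a binary search on the distance over the monotone greedy feasibility check (O(n log D) instead of O(n*D)); B's greedy check tracks the previous stall value and tests count>=cows once at the end instead of A's index-tracking early-return count==cows test.
-- outside the precondition, e.g. on aggressiveCowsBruteForce([0, 5], 1): A returns 1, B returns 5; on aggressiveCowsBruteForce([0, 5], 0): A returns 1, B returns 5; on aggressiveCowsBruteForce([0, 2, 9], 1): A returns 9, B returns 9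
import Mathlib
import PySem

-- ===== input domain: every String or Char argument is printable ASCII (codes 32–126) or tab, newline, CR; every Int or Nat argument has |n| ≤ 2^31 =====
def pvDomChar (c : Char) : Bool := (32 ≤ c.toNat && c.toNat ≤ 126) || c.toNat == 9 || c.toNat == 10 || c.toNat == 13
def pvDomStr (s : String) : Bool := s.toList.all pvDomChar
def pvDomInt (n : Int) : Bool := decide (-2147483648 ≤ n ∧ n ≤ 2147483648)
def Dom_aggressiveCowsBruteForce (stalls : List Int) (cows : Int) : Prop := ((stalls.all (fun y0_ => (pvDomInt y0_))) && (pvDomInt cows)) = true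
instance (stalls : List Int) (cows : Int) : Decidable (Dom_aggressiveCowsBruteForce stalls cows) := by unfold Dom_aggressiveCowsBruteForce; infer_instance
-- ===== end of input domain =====

-- B replaces A's scan over all candidate distances with a binary search on the distance over the
-- monotone greedy feasibility check (objective: faster). Pre_ excludes the empty list (A raises)
-- and cows < 2, a vacuous corner where A's and B's values are both defensible (see Pre_ below).


-- ===== PORT A =====
-- the 'for currentIndex in range(1, arrayLength)' loop of canBeAPossibleSolution, with its two
-- early 'return' exits; indices are always in range when called, so pyGetD's default is unreachable
def canBeLoop (stalls : List Int) (cows distance count indexOfPreviousCow : Int)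
    (idxs : List Int) : Bool :=
  match idxs with
  | [] => false
  | currentIndex :: rest =>
    let distanceBetweenTowCows :=
      PySem.List.pyGetD stalls currentIndex 0 - PySem.List.pyGetD stalls indexOfPreviousCow 0
    let count' := if distanceBetweenTowCows ≥ distance then count + 1 else count
    let prev' := if distanceBetweenTowCows ≥ distance then currentIndex else indexOfPreviousCow
    if count' == cows then true else canBeLoop stalls cows distance count' prev' rest

def canBeAPossibleSolution (stalls : List Int) (arrayLength cows distance : Int) : Bool :=
  canBeLoop stalls cows distance 1 0 (PySem.List.pyRange 1 arrayLength 1)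

def aggressiveCowsBruteForce (stalls : List Int) (cows : Int) : Int :=
  -- stalls[-1] raises IndexError on []: Pre_ excludes the empty list
  let maximumDistance := PySem.List.pyGetD stalls (-1) 0 - PySem.List.pyGetD stalls 0 0
  (PySem.List.pyRange 1 (maximumDistance + 1) 1).foldl
    (fun ans dis =>
      if canBeAPossibleSolution stalls (stalls.length : Int) cows dis then max ans dis else ans)
    1

-- ===== PORT B =====
-- loop body of B's canPlace: state (count, prev stall value)
def stepB (distance : Int) (cp : Int × Int) (x : Int) : Int × Int :=
  if x - cp.2 ≥ distance then (cp.1 + 1, x) else cp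

def canPlace (stalls : List Int) (cows distance : Int) : Bool :=
  let st := (PySem.List.slice stalls (some 1) none).foldl (stepB distance)
    (1, PySem.List.pyGetD stalls 0 0)
  st.1 ≥ cows

-- B's 'while lo <= hi' binary-search loop; fuel bounds the iteration count (each pass shrinks
-- hi - lo, so (hi + 1 - lo).toNat passes always suffice and the loop exits on lo > hi as in Python)
def bsLoop (stalls : List Int) (cows : Int) (fuel : Nat) (lo hi ans : Int) : Int :=
  match fuel with
  | 0 => ans
  | fuel + 1 =>
    if lo ≤ hi then
      let mid := PySem.Int.floordiv (lo + hi) 2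
      if canPlace stalls cows mid then bsLoop stalls cows fuel (mid + 1) hi mid
      else bsLoop stalls cows fuel lo (mid - 1) ans
    else ans

def aggressiveCowsBruteForce_alt (stalls : List Int) (cows : Int) : Int :=
  -- stalls[-1] raises IndexError on []: Pre_ excludes the empty list
  let lo : Int := 1
  let hi := PySem.List.pyGetD stalls (-1) 0 - PySem.List.pyGetD stalls 0 0
  bsLoop stalls cows (hi + 1 - lo).toNat lo hi 1

-- ===== PRECONDITION & SPEC =====
-- Pre_ excludes the empty stall list, on which both Pythons raise IndexError (stalls[-1]), and
-- cows < 2, a corner where the minimum distance between cows is vacuous: there A's value (1 or the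
-- full span, depending on where its count==cows test fires) and B's (the full span) are both
-- defensible and no specification picks one.
def Pre_aggressiveCowsBruteForce (stalls : List Int) (cows : Int) : Prop :=
  stalls ≠ [] ∧ 2 ≤ cows
instance (stalls : List Int) (cows : Int) : Decidable (Pre_aggressiveCowsBruteForce stalls cows) := by
  unfold Pre_aggressiveCowsBruteForce; infer_instance
def pvWitness_aggressiveCowsBruteForce : List Int × Int := ([0, 5, 9], 2)

def Spec_aggressiveCowsBruteForce (stalls : List Int) (cows : Int) (out : Int) : Prop :=
  out = aggressiveCowsBruteForce_alt stalls cows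
instance (stalls : List Int) (cows : Int) (out : Int) : Decidable (Spec_aggressiveCowsBruteForce stalls cows out) := by
  unfold Spec_aggressiveCowsBruteForce; infer_instance

-- ===== CLAIM (what is proved, stated in full; the proofs are below) =====
def Claim_equal_aggressiveCowsBruteForce : Prop := ∀ (stalls : List Int) (cows : Int), Dom_aggressiveCowsBruteForce stalls cows → Pre_aggressiveCowsBruteForce stalls cows → Spec_aggressiveCowsBruteForce stalls cows (aggressiveCowsBruteForce stalls cows)

-- ===== LEMMAS AND PROOFS =====

-- value-based form of A's early-return loop (prev is the previous cow's stall VALUE)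
def earlyA (cows distance count prev : Int) (xs : List Int) : Bool :=
  match xs with
  | [] => false
  | x :: rest =>
    let count' := if x - prev ≥ distance then count + 1 else count
    let prev' := if x - prev ≥ distance then x else prev
    if count' == cows then true else earlyA cows distance count' prev' rest

theorem count_le_foldl_stepB (d : Int) (xs : List Int) (cp : Int × Int) :
    cp.1 ≤ (xs.foldl (stepB d) cp).1 := by
  induction xs generalizing cp with
  | nil => exact le_refl _
  | cons x rest ih =>
    simp only [List.foldl_cons, stepB]
    split
    · exact le_trans (by omega) (ih _)
    · exact ih _

theorem earlyA_lt (cows d : Int) (xs : List Int) :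
    ∀ (c p : Int), c < cows →
      earlyA cows d c p xs = decide (cows ≤ (xs.foldl (stepB d) (c, p)).1) := by
  induction xs with
  | nil =>
    intro c p hc
    simp only [List.foldl_nil, earlyA]
    symm
    simp only [decide_eq_false_iff_not]
    omega
  | cons x rest ih =>
    intro c p hc
    simp only [earlyA, List.foldl_cons, stepB]
    by_cases hge : x - p ≥ d
    · simp only [if_pos hge]
      by_cases hcc : c + 1 = cows
      · have hle : cows ≤ (rest.foldl (stepB d) (c + 1, x)).1 := by
          have := count_le_foldl_stepB d rest (c + 1, x); simp at this; omega
        have heq : ((c + 1) == cows) = true := by simpa using hcc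
        simp [heq, hle]
      · have hne : ¬ ((c + 1) == cows) = true := by simpa using hcc
        simp only [hne]
        exact ih _ _ (by omega)
    · simp only [if_neg hge]
      have hne : ¬ (c == cows) = true := by simp; omega
      simp only [hne]
      exact ih _ _ hc

theorem foldl_stepB_mono (d d' : Int) (hdd : d ≤ d') (hd' : 0 ≤ d') (xs : List Int) :
    ∀ (c c' v v' : Int), c' ≤ c → v ≤ v' + (c - c') * d' →
      (xs.foldl (stepB d') (c', v')).1 ≤ (xs.foldl (stepB d) (c, v)).1 := by
  induction xs with
  | nil => intro c c' v v' h1 _; exact h1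
  | cons x rest ih =>
    intro c c' v v' h1 h2
    simp only [List.foldl_cons, stepB]
    by_cases hp' : x - v' ≥ d'
    · simp only [if_pos hp']
      by_cases hp : x - v ≥ d
      · simp only [if_pos hp]
        exact ih (c+1) (c'+1) x x (by omega) (by nlinarith)
      · -- d does not place: then c > c' (else contradiction)
        have hcc : c' < c := by
          rcases lt_or_ge c' c with h | h
          · exact h
          · exfalso
            have : c = c' := by omega
            subst this
            nlinarith
        simp only [if_neg hp]
        exact ih c (c'+1) v x (by omega) (by nlinarith)
    · simp only [if_neg hp']
      by_cases hp : x - v ≥ d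
      · simp only [if_pos hp]
        have hq : 0 ≤ (c - c') * d' := mul_nonneg (by omega) hd'
        exact ih (c+1) c' x v' (by omega) (by nlinarith)
      · simp only [if_neg hp]
        exact ih c c' v v' h1 h2

theorem bridgeA (stalls : List Int) (cows d : Int) :
    ∀ (n : Nat) (k prev : Nat) (c : Int), stalls.length ≤ k + n →
      canBeLoop stalls cows d c (prev : Int) (PySem.List.pyRange (k : Int) (stalls.length : Int) 1)
        = earlyA cows d c (stalls.getD prev 0) (stalls.drop k) := by
  intro n
  induction n with
  | zero =>
    intro k prev c hk
    rw [PySem.List.pyRange_one_eq_nil (by exact_mod_cast hk), List.drop_of_length_le (by omega)]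
    rfl
  | succ n ih =>
    intro k prev c hk
    by_cases hkl : k < stalls.length
    · rw [PySem.List.pyRange_one_cons (by exact_mod_cast hkl)]
      rw [List.drop_eq_getElem_cons hkl]
      simp only [canBeLoop, earlyA, PySem.List.pyGetD_natCast]
      have hg : stalls.getD k 0 = stalls[k] := List.getD_eq_getElem stalls 0 hkl
      rw [hg]
      have hcast : (k : Int) + 1 = ((k + 1 : Nat) : Int) := by push_cast; ring
      by_cases hge : stalls[k] - stalls.getD prev 0 ≥ d
      · simp only [if_pos hge]
        by_cases hc : (c + 1) == cows
        · simp [hc]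
        · simp only [hc, Bool.false_eq_true, if_false, hcast]
          rw [ih (k+1) k (c+1) (by omega), hg]
      · simp only [if_neg hge]
        by_cases hc : c == cows
        · simp [hc]
        · simp only [hc, Bool.false_eq_true, if_false, hcast]
          exact ih (k+1) prev c (by omega)
    · rw [PySem.List.pyRange_one_eq_nil (by exact_mod_cast (by omega : stalls.length ≤ k)),
        List.drop_of_length_le (by omega)]
      rfl

-- A's distance loop: characterisations of the running maximum
theorem maxfold_ge_init (Q : Int → Bool) (l : List Int) :
    ∀ init : Int, init ≤ l.foldl (fun ans dis => if Q dis then max ans dis else ans) init := by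
  induction l with
  | nil => intro init; exact le_refl _
  | cons x rest ih =>
    intro init
    simp only [List.foldl_cons]
    split
    · exact le_trans (le_max_left _ _) (ih _)
    · exact ih _

theorem maxfold_ge_mem (Q : Int → Bool) (l : List Int) :
    ∀ (init d : Int), d ∈ l → Q d = true →
      d ≤ l.foldl (fun ans dis => if Q dis then max ans dis else ans) init := by
  induction l with
  | nil => intro _ _ h; exact absurd h (List.not_mem_nil)
  | cons x rest ih =>
    intro init d hd hq
    simp only [List.foldl_cons]
    rcases List.mem_cons.mp hd with h | h
    · subst h
      simp only [hq, if_true]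
      exact le_trans (le_max_right _ _) (maxfold_ge_init Q rest _)
    · exact ih _ d h hq

theorem maxfold_cases (Q : Int → Bool) (l : List Int) :
    ∀ init : Int,
      l.foldl (fun ans dis => if Q dis then max ans dis else ans) init = init ∨
      (Q (l.foldl (fun ans dis => if Q dis then max ans dis else ans) init) = true ∧
        l.foldl (fun ans dis => if Q dis then max ans dis else ans) init ∈ l) := by
  induction l with
  | nil => intro init; exact Or.inl rfl
  | cons x rest ih =>
    intro init
    simp only [List.foldl_cons]
    by_cases hq : Q x = true
    · simp only [hq, if_true]
      rcases ih (max init x) with h | h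
      · rcases max_choice init x with hm | hm
        · rw [h, hm]; exact Or.inl rfl
        · rw [h, hm]; exact Or.inr ⟨hq, List.mem_cons_self⟩
      · exact Or.inr ⟨h.1, List.mem_cons_of_mem _ h.2⟩
    · simp only [hq]
      rcases ih init with h | h
      · exact Or.inl h
      · exact Or.inr ⟨h.1, List.mem_cons_of_mem _ h.2⟩

-- B's binary-search loop: result is either ans or a feasible value in [lo, hi]
theorem bsLoop_cases (stalls : List Int) (cows : Int) :
    ∀ (fuel : Nat) (lo hi ans : Int),
      bsLoop stalls cows fuel lo hi ans = ans ∨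
      (canPlace stalls cows (bsLoop stalls cows fuel lo hi ans) = true ∧
        lo ≤ bsLoop stalls cows fuel lo hi ans ∧ bsLoop stalls cows fuel lo hi ans ≤ hi) := by
  intro fuel
  induction fuel with
  | zero => intro lo hi ans; exact Or.inl rfl
  | succ n ih =>
    intro lo hi ans
    by_cases h : lo ≤ hi
    · rw [bsLoop, if_pos h]
      have hb := PySem.Int.floordiv_two_mid_bounds h
      set mid := PySem.Int.floordiv (lo + hi) 2 with hmid
      by_cases hp : canPlace stalls cows mid = true
      · rw [if_pos hp]
        rcases ih (mid + 1) hi mid with h2 | h2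
        · rw [h2]; exact Or.inr ⟨hp, by omega, by omega⟩
        · exact Or.inr ⟨h2.1, by omega, h2.2.2⟩
      · rw [if_neg hp]
        rcases ih lo (mid - 1) ans with h2 | h2
        · exact Or.inl h2
        · exact Or.inr ⟨h2.1, h2.2.1, by have := h2.2.2; omega⟩
    · rw [bsLoop, if_neg h]
      exact Or.inl rfl

-- with a downward-monotone feasibility predicate, the result dominates every feasible d in [lo, hi]
theorem bsLoop_ge (stalls : List Int) (cows : Int)
    (mono : ∀ d e : Int, 1 ≤ d → d ≤ e → canPlace stalls cows e = true → canPlace stalls cows d = true) :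
    ∀ (fuel : Nat) (lo hi ans d : Int), (hi + 1 - lo).toNat ≤ fuel → 1 ≤ lo →
      lo ≤ d → d ≤ hi → canPlace stalls cows d = true →
      d ≤ bsLoop stalls cows fuel lo hi ans := by
  intro fuel
  induction fuel with
  | zero => intro lo hi ans d hn _ _ _ _; omega
  | succ n ih =>
    intro lo hi ans d hn hlo hld hdh hp
    have h : lo ≤ hi := by omega
    rw [bsLoop, if_pos h]
    have hb := PySem.Int.floordiv_two_mid_bounds h
    set mid := PySem.Int.floordiv (lo + hi) 2 with hmid
    by_cases hpm : canPlace stalls cows mid = true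
    · rw [if_pos hpm]
      by_cases hdm : mid + 1 ≤ d
      · exact ih (mid + 1) hi mid d (by omega) (by omega) hdm hdh hp
      · rcases bsLoop_cases stalls cows n (mid + 1) hi mid with h2 | h2
        · omega
        · omega
    · rw [if_neg hpm]
      have hdm : d ≤ mid - 1 := by
        by_contra hcon
        exact hpm (mono mid d (by omega) (by omega) hp)
      exact ih lo (mid - 1) ans d (by omega) hlo hld hdm hp


theorem canPlace_eq (stalls : List Int) (cows d : Int) :
    canPlace stalls cows d
      = decide (cows ≤ ((stalls.drop 1).foldl (stepB d) (1, stalls.getD 0 0)).1) := by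
  unfold canPlace
  have hs : PySem.List.slice stalls (some 1) none = stalls.drop 1 := by
    simpa using PySem.List.slice_from_natCast (xs := stalls) (a := 1)
  rw [hs, PySem.List.pyGetD_zero]

theorem qA_eq (stalls : List Int) (cows dis : Int) :
    canBeAPossibleSolution stalls (stalls.length : Int) cows dis
      = earlyA cows dis 1 (stalls.getD 0 0) (stalls.drop 1) := by
  unfold canBeAPossibleSolution
  have h := bridgeA stalls cows dis stalls.length 1 0 1 (by omega)
  simpa using h

-- ===== VERDICT (by name: the statement is the Claim_ definition above) =====
theorem aggressiveCowsBruteForce_spec : Claim_equal_aggressiveCowsBruteForce := by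
  intro stalls cows _ hpre
  obtain ⟨hne, hc2⟩ := hpre
  show aggressiveCowsBruteForce stalls cows = aggressiveCowsBruteForce_alt stalls cows
  simp only [aggressiveCowsBruteForce, aggressiveCowsBruteForce_alt]
  set M := PySem.List.pyGetD stalls (-1) 0 - PySem.List.pyGetD stalls 0 0 with hMdef
  set rA := (PySem.List.pyRange 1 (M + 1) 1).foldl
      (fun ans dis => if canBeAPossibleSolution stalls (stalls.length : Int) cows dis
        then max ans dis else ans) 1 with hrA
  set rB := bsLoop stalls cows (M + 1 - 1).toNat 1 M 1 with hrB
  have hA0 : 1 ≤ rA := by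
    rw [hrA]; exact maxfold_ge_init _ _ 1
  have hAc : rA = 1 ∨ (canBeAPossibleSolution stalls (stalls.length : Int) cows rA = true ∧
      1 ≤ rA ∧ rA ≤ M) := by
    rcases maxfold_cases (fun dis => canBeAPossibleSolution stalls (stalls.length : Int) cows dis)
        (PySem.List.pyRange 1 (M + 1) 1) 1 with h | h
    · exact Or.inl h
    · refine Or.inr ⟨h.1, ?_, ?_⟩ <;>
        (have := (PySem.List.mem_pyRange_one).mp h.2; omega)
  have hAub : ∀ d, 1 ≤ d → d ≤ M →
      canBeAPossibleSolution stalls (stalls.length : Int) cows d = true → d ≤ rA := by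
    intro d h1 h2 hq
    rw [hrA]
    exact maxfold_ge_mem _ _ 1 d ((PySem.List.mem_pyRange_one).mpr ⟨h1, by omega⟩) hq
  have hBc : rB = 1 ∨ (canPlace stalls cows rB = true ∧ 1 ≤ rB ∧ rB ≤ M) := by
    rw [hrB]
    rcases bsLoop_cases stalls cows (M + 1 - 1).toNat 1 M 1 with h | h
    · exact Or.inl h
    · exact Or.inr h
  have hQP : ∀ d : Int, canBeAPossibleSolution stalls (stalls.length : Int) cows d
      = canPlace stalls cows d := by
    intro d
    rw [qA_eq, canPlace_eq, earlyA_lt cows d _ 1 (stalls.getD 0 0) (by omega)]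
  have mono : ∀ d e : Int, 1 ≤ d → d ≤ e → canPlace stalls cows e = true →
      canPlace stalls cows d = true := by
    intro d e h1 h2 hp
    rw [canPlace_eq] at hp ⊢
    simp only [decide_eq_true_eq] at hp ⊢
    have := foldl_stepB_mono d e h2 (by omega) (stalls.drop 1) 1 1
      (stalls.getD 0 0) (stalls.getD 0 0) le_rfl (by simp)
    omega
  have hBub : ∀ d, 1 ≤ d → d ≤ M → canPlace stalls cows d = true → d ≤ rB := by
    intro d h1 h2 hp
    rw [hrB]
    exact bsLoop_ge stalls cows mono (M + 1 - 1).toNat 1 M 1 d (by omega) le_rfl h1 h2 hp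
  rcases hAc with h | h
  · rcases hBc with h2 | h2
    · rw [h, h2]
    · have : rB ≤ rA := hAub rB h2.2.1 h2.2.2 (by rw [hQP]; exact h2.1)
      omega
  · have hab : rA ≤ rB := hBub rA h.2.1 h.2.2 (by rw [← hQP]; exact h.1)
    rcases hBc with h2 | h2
    · omega
    · have hba : rB ≤ rA := hAub rB h2.2.1 h2.2.2 (by rw [hQP]; exact h2.1)
      omega
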